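-- pv_equiv track=rewrite | github.com/bioinf-rnrmu-stotoshka/bioformats-hmelisumeli | code/sam_reader.py | get_header_groups
-- ===== SOURCE A (Python) =====
-- def get_header_groups(headers):  # Группируем заголовки по типам (@HD, @SQ, @RG, @PG)
--     groups = {}
--     for header in headers:
--         header_type = header.split("\t")[0]
--         if header_type not in groups:
--             groups[header_type] = []
--         groups[header_type].append(header)
--     return groups
-- ===== SOURCE B (Python) =====
-- def get_header_groups(headers):
--     # Two-pass: first the distinct types in first-occurrence order, then one
--     # filtered scan per type.  Same result (values and key order) as A.
--     types = list(dict.fromkeys(h.split("\t")[0] for h in headers))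
--     return {t: [h for h in headers if h.split("\t")[0] == t] for t in types}
-- ===== Notes on version B (the rewrite author's own statement) =====
-- stated objective: alternative
-- what changed: Replaces the single-pass dict-accumulation loop by a two-pass scheme: an ordered dedup of the tab-prefixed types followed by one filtering scan per type; first-occurrence key order is preserved by dict.fromkeys.
import Mathlib
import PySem

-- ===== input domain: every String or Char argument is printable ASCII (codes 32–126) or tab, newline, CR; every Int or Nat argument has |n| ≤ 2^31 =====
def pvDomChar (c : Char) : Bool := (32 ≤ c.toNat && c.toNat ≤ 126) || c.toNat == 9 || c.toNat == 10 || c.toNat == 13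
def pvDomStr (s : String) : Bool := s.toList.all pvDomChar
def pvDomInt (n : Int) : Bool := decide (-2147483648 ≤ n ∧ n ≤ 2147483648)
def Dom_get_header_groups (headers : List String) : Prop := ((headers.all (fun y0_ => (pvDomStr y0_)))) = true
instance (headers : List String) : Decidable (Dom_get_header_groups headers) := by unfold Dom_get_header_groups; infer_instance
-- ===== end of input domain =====

-- B differs from A by decomposition (two passes: ordered dedup of the types, then one filter per type); same return value.

-- shared key extraction: header.split("\t")[0].  split with a nonempty
-- separator never returns an empty list, so Python's [0] never raises and
-- equals the head.
def pvKey (h : String) : String := ((PySem.Str.split? h "\t").getD []).headD ""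

-- ===== PORT A =====
-- one pass: a dict of lists, inserting [] on first sight of a type, then appending
def get_header_groups (headers : List String) : List (String × List String) :=
  (headers.foldl
    (fun groups header =>
      let header_type := pvKey header
      let groups := if groups.contains header_type then groups
                    else groups.insert header_type []
      groups.modify header_type [] (· ++ [header]))
    (PySem.Dict.empty : PySem.Dict String (List String))).items

-- ===== PORT B =====
def get_header_groups_alt (headers : List String) : List (String × List String) :=
  (PySem.List.dedup (headers.map pvKey)).map
    (fun t => (t, headers.filter (fun h => pvKey h == t)))

-- ===== PRECONDITION & SPEC =====
def Spec_get_header_groups (headers : List String) (out : List (String × List String)) : Prop := out = get_header_groups_alt headers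
instance (headers : List String) (out : List (String × List String)) : Decidable (Spec_get_header_groups headers out) := by unfold Spec_get_header_groups; infer_instance

-- ===== CLAIM (what is proved, stated in full; the proofs are below) =====
def Claim_equal_get_header_groups : Prop := ∀ (headers : List String), Dom_get_header_groups headers → Spec_get_header_groups headers (get_header_groups headers)

-- ===== LEMMAS AND PROOFS =====

-- A's two-step body (ensure the key is present, then append) is one modify step.
lemma step_eq_modify (d : PySem.Dict String (List String)) (h : String) :
    (let header_type := pvKey h
     let d' := if d.contains header_type then d
               else d.insert header_type []
     d'.modify header_type [] (· ++ [h])) = d.modify (pvKey h) [] (· ++ [h]) := by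
  by_cases hc : d.contains (pvKey h)
  · simp [hc]
  · simp only [hc, if_neg, Bool.false_eq_true, not_false_eq_true]
    rw [PySem.Dict.modify, PySem.Dict.modify,
      PySem.Dict.getD_insert_self, PySem.Dict.insert_insert_self,
      PySem.Dict.getD_of_not_contains _ _ (by simpa using hc)]

-- A's whole loop is the canonical grouping fold.
lemma fold_eq (headers : List String) (d : PySem.Dict String (List String)) :
    headers.foldl
      (fun groups header =>
        let header_type := pvKey header
        let groups := if groups.contains header_type then groups
                      else groups.insert header_type []
        groups.modify header_type [] (· ++ [header])) d
    = headers.foldl (fun d h => d.modify (pvKey h) [] (· ++ [h])) d := by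
  induction headers generalizing d with
  | nil => rfl
  | cons h t ih => simpa [List.foldl_cons] using by rw [step_eq_modify]; exact ih _

-- ===== VERDICT (by name: the statement is the Claim_ definition above) =====
theorem get_header_groups_spec : Claim_equal_get_header_groups := by
  intro headers _
  show get_header_groups headers = get_header_groups_alt headers
  unfold get_header_groups get_header_groups_alt
  rw [fold_eq]
  have hD : headers.foldl (fun d h => d.modify (pvKey h) [] (· ++ [h]))
        (PySem.Dict.empty : PySem.Dict String (List String))
      = (headers.map (fun h => (pvKey h, h))).foldl
          (fun d p => d.modify p.1 [] (· ++ [p.2])) PySem.Dict.empty := by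
    rw [List.foldl_map]
  have hnd : (headers.foldl (fun d h => d.modify (pvKey h) [] (· ++ [h]))
      (PySem.Dict.empty : PySem.Dict String (List String))).keys.Nodup :=
    PySem.Dict.nodup_keys_foldl_modify_key headers pvKey [] (fun _ h => (· ++ [h])) _
      (by simp [PySem.Dict.keys_empty])
  rw [PySem.Dict.items_eq_map_keys _ hnd []]
  have hkeys : (headers.foldl (fun d h => d.modify (pvKey h) [] (· ++ [h]))
      (PySem.Dict.empty : PySem.Dict String (List String))).keys
      = PySem.List.dedup (headers.map pvKey) := by
    rw [PySem.Dict.keys_foldl_modify_key headers pvKey [] (fun _ h => (· ++ [h]))]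
    simp [PySem.Dict.keys_empty, PySem.Set.update, PySem.List.dedup,
      PySem.Set.ofList_eq_foldl]
  have hget : ∀ c, (headers.foldl (fun d h => d.modify (pvKey h) [] (· ++ [h]))
      (PySem.Dict.empty : PySem.Dict String (List String))).getD c []
      = headers.filter (fun h => pvKey h == c) := by
    intro c
    rw [hD, PySem.Dict.getD_foldl_modify_append]
    simp [List.filter_map, List.map_map, Function.comp_def, PySem.Dict.getD_empty]
  rw [hkeys]
  exact List.map_congr_left (fun k _ => by rw [hget k])
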